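-- pv_equiv track=rewrite | github.com/Huyenchu26/2A202600015-ChuThiNgocHuyen-Day07 | src/test_benchmark_queries.py | demo_llm
-- ===== SOURCE A (Python) =====
-- def demo_llm(prompt: str) -> str:
--     """Mock LLM for demo."""
--     # Extract just the context part for clearer output
--     lines = prompt.split('\n')
--     start = -1
--     for i, line in enumerate(lines):
--         if 'Relevant context:' in line:
--             start = i + 1
--             break
--     if start != -1:
--         context = '\n'.join(lines[start:start+5])
--         return f"[LLM Generated]\n{context}"
--     return prompt[:200]
-- ===== SOURCE B (Python) =====
-- def demo_llm(prompt: str) -> str: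
--     """Mock LLM for demo."""
--     # Locate the marker by raw substring search instead of splitting into lines.
--     idx = prompt.find('Relevant context:')
--     if idx == -1:
--         return prompt[:200]
--     nl = prompt.find('\n', idx)
--     if nl == -1:
--         context = ''
--     else:
--         context = '\n'.join(prompt[nl + 1:].split('\n')[:5])
--     return f"[LLM Generated]\n{context}"
-- ===== Notes on version B (the rewrite author's own statement) =====
-- stated objective: idiomatic
-- what changed: B locates the marker by raw substring find over the whole prompt and cuts the context at the newline ending the marker line, instead of splitting the prompt into an indexed list of lines and scanning it with enumerate; only the at-most-5-line tail is ever split.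
import Mathlib
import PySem

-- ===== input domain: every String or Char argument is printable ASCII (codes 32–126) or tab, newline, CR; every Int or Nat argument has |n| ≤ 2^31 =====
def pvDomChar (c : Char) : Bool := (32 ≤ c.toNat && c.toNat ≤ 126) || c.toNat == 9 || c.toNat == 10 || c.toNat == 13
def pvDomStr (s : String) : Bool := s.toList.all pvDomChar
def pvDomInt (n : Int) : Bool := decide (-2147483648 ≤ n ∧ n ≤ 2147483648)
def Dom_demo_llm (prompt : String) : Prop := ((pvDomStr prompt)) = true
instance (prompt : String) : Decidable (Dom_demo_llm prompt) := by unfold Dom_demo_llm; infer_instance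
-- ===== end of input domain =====

-- B locates the marker by raw substring search over the whole prompt (str.find) instead of
-- splitting the prompt into an indexed list of lines and scanning it with enumerate (objective:
-- idiomatic); the return value is proved equal on all inputs.

-- ===== PORT A =====
-- the loop `for i, line in enumerate(lines): if 'Relevant context:' in line: start = i + 1; break`
def pvFindStartA : List (List Char) → Int → Int
  | [], _ => -1
  | l :: rest, i => if PySem.Chars.isIn "Relevant context:".toList l then i + 1 else pvFindStartA rest (i + 1)

def demo_llm (prompt : String) : String :=
  let lines := PySem.Chars.splitOn prompt.toList "\n".toList
  let start := pvFindStartA lines 0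
  if start ≠ -1 then
    String.ofList ("[LLM Generated]\n".toList ++
      PySem.Chars.join "\n".toList (PySem.List.slice lines (some start) (some (start + 5))))
  else
    String.ofList (PySem.List.slice prompt.toList none (some 200))

-- ===== PORT B =====
def demo_llm_alt (prompt : String) : String :=
  let s := prompt.toList
  let idx := PySem.Chars.find s "Relevant context:".toList
  if idx = -1 then
    String.ofList (PySem.List.slice s none (some 200))
  else
    let nl := PySem.Chars.findFrom s "\n".toList idx
    let context :=
      if nl = -1 then []
      else PySem.Chars.join "\n".toList
        (PySem.List.slice (PySem.Chars.splitOn (PySem.List.slice s (some (nl + 1)) none) "\n".toList)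
          none (some 5))
    String.ofList ("[LLM Generated]\n".toList ++ context)

-- ===== PRECONDITION & SPEC =====
def Spec_demo_llm (prompt : String) (out : String) : Prop := out = demo_llm_alt prompt
instance (prompt : String) (out : String) : Decidable (Spec_demo_llm prompt out) := by unfold Spec_demo_llm; infer_instance

-- ===== CLAIM (what is proved, stated in full; the proofs are below) =====
def Claim_equal_demo_llm : Prop := ∀ (prompt : String), Dom_demo_llm prompt → Spec_demo_llm prompt (demo_llm prompt)

-- ===== LEMMAS AND PROOFS =====

theorem pvSplitOn_go_spec (c : Char) (fuel : Nat) (l cur : List Char) (hacc : List (List Char))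
    (h : l.length < fuel) :
    PySem.Chars.splitOn.go [c] fuel l cur hacc =
      hacc.reverse ++ (List.splitOn c l).modifyHead (cur.reverse ++ ·) := by
  induction fuel generalizing l cur hacc with
  | zero => omega
  | succ fuel ih =>
    cases l with
    | nil =>
      simp [PySem.Chars.splitOn.go, List.splitOn_nil]
    | cons x xs =>
      rw [PySem.Chars.splitOn.go]
      simp only [List.isPrefixOf, Bool.and_true]
      by_cases hx : c = x
      · subst hx
        simp only [beq_self_eq_true, if_pos]
        rw [ih _ _ _ (by simpa using h)]
        simp [List.splitOn, List.splitOnP_cons]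
        rcases List.splitOnP (fun x => x == c) xs with _ | ⟨a, b⟩ <;> simp
      · rw [if_neg (by simp [hx])]
        rw [ih _ _ _ (by simpa using h)]
        simp only [List.splitOn, List.splitOnP_cons]
        rw [if_neg (by simp [Ne.symm hx])]
        rcases hsp : List.splitOnP (fun x_1 => x_1 == c) xs with _ | ⟨hd, tl⟩
        · exact absurd hsp (List.splitOnP_ne_nil _ _)
        · simp

theorem pvSplitOn_eq (c : Char) (s : List Char) :
    PySem.Chars.splitOn s [c] = List.splitOn c s := by
  rw [PySem.Chars.splitOn, pvSplitOn_go_spec c _ _ _ _ (by omega)]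
  rcases hsp : List.splitOn c s with _ | ⟨hd, tl⟩
  · exact absurd hsp (by simpa [List.splitOn] using List.splitOnP_ne_nil (fun x => x == c) s)
  · simp

theorem pvSplitOnP_free {α : Type} (p : α → Bool) (xs : List α) :
    ∀ l ∈ List.splitOnP p xs, ∀ a ∈ l, ¬ p a := by
  induction xs with
  | nil => simp [List.splitOnP_nil]
  | cons x xs ih =>
    rw [List.splitOnP_cons]
    by_cases hx : p x
    · simp only [hx, if_pos]
      intro l hl
      rcases List.mem_cons.mp hl with h | h
      · simp [h]
      · exact ih l h
    · simp only [hx, if_neg, Bool.false_eq_true, not_false_iff]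
      rcases hsp : List.splitOnP p xs with _ | ⟨hd, tl⟩
      · exact absurd hsp (List.splitOnP_ne_nil _ _)
      · intro l hl
        simp only [List.modifyHead] at hl
        rcases List.mem_cons.mp hl with h | h
        · subst h
          intro a ha
          rcases List.mem_cons.mp ha with h | h
          · simpa [h] using hx
          · exact ih hd (by simp [hsp]) a h
        · exact ih l (by simp [hsp, h])

theorem pvSplitOn_free (c : Char) (s : List Char) :
    ∀ l ∈ List.splitOn c s, c ∉ l := by
  intro l hl hc
  exact pvSplitOnP_free (fun x => x == c) s l (by simpa [List.splitOn] using hl) c hc (by simp)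

def pvMarker : List Char := "Relevant context:".toList

def pvSpecRest : List (List Char) → Option (List (List Char))
  | [] => none
  | l :: rest => if PySem.Chars.isIn pvMarker l then some rest else pvSpecRest rest

theorem pvFindStartA_none (L : List (List Char)) (i : Int) :
    pvSpecRest L = none → pvFindStartA L i = -1 := by
  induction L generalizing i with
  | nil => intro _; rfl
  | cons l rest ih =>
    intro h
    rw [pvSpecRest] at h
    rw [pvFindStartA]
    by_cases hm : PySem.Chars.isIn pvMarker l
    · simp [hm] at h
    · rw [if_neg (by simpa [pvMarker] using hm)]
      exact ih _ (by simpa [hm] using h)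

theorem pvFindStartA_some (L : List (List Char)) (rest : List (List Char)) (i : Int)
    (h : pvSpecRest L = some rest) :
    ∃ j : Nat, pvFindStartA L i = i + j + 1 ∧ rest = L.drop (j + 1) := by
  induction L generalizing i with
  | nil => simp [pvSpecRest] at h
  | cons l tl ih =>
    rw [pvSpecRest] at h
    by_cases hm : PySem.Chars.isIn pvMarker l
    · refine ⟨0, ?_, ?_⟩
      · rw [pvFindStartA, if_pos (by simpa [pvMarker] using hm)]; ring
      · simp [hm] at h; simp [h]
    · obtain ⟨j, h1, h2⟩ := ih (i + 1) (by simpa [hm] using h)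
      refine ⟨j + 1, ?_, ?_⟩
      · rw [pvFindStartA, if_neg (by simpa [pvMarker] using hm), h1]; push_cast; ring
      · simpa using h2

theorem pvPrefix_split (m u ys : List Char) (c : Char) (hc : c ∉ m)
    (h : m <+: u ++ c :: ys) : m <+: u := by
  rcases Nat.lt_or_ge u.length m.length with hlt | hle
  · exfalso
    apply hc
    have := h.getElem (i := u.length) (by omega)
    rw [List.getElem_append_right (le_refl _)] at this
    simp at this
    exact this ▸ List.getElem_mem _
  · rw [List.prefix_iff_eq_take] at h
    rw [List.take_append_of_le_length hle] at h
    exact h ▸ List.take_prefix _ _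

theorem pvDrop_prefix_infix {m xs : List Char} (j : Nat) (h : m <+: xs.drop j) : m <:+: xs :=
  h.isInfix.trans (List.drop_suffix j xs).isInfix

theorem pvInfix_iff_exists_drop (m s : List Char) : m <:+: s ↔ ∃ j, m <+: s.drop j := by
  constructor
  · intro h
    have := (PySem.Chars.isIn_iff_infix m s).mpr h
    exact (PySem.Chars.exists_prefix_drop_iff_isIn m s).mpr this
  · rintro ⟨j, hj⟩
    exact pvDrop_prefix_infix j hj

theorem pvInfix_append_cons (m xs ys : List Char) (c : Char) (hc : c ∉ m) :
    m <:+: xs ++ c :: ys ↔ m <:+: xs ∨ m <:+: ys := by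
  constructor
  · intro h
    obtain ⟨j, hj⟩ := (pvInfix_iff_exists_drop _ _).mp h
    rcases Nat.lt_or_ge j (xs.length + 1) with hle | hgt
    · rw [List.drop_append_of_le_length (by omega)] at hj
      exact Or.inl (pvDrop_prefix_infix j (pvPrefix_split m _ ys c hc hj))
    · rw [List.drop_append] at hj
      rw [List.drop_eq_nil_of_le (by omega), List.nil_append,
        show j - xs.length = j - xs.length - 1 + 1 by omega, List.drop_succ_cons] at hj
      exact Or.inr (pvDrop_prefix_infix _ hj)
  · rintro (h | h)
    · exact h.trans ⟨[], c :: ys, by simp⟩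
    · exact h.trans ⟨xs ++ [c], [], by simp⟩

theorem pvJoin_cons (c : Char) (l : List Char) (rest : List (List Char)) (h : rest ≠ []) :
    PySem.Chars.join [c] (l :: rest) = l ++ c :: PySem.Chars.join [c] rest := by
  rcases rest with _ | ⟨b, t⟩
  · exact absurd rfl h
  · rw [PySem.Chars.join_cons_cons]; simp

theorem pvInfix_join (m : List Char) (c : Char) (hc : c ∉ m) (hm : m ≠ []) :
    ∀ L : List (List Char), (m <:+: PySem.Chars.join [c] L ↔ ∃ l ∈ L, m <:+: l) := by
  intro L
  induction L with
  | nil =>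
    simp [PySem.Chars.join_nil]
    intro h
    exact hm h
  | cons l rest ih =>
    rcases eq_or_ne rest [] with rfl | hne
    · simp [PySem.Chars.join_singleton]
    · rw [pvJoin_cons c l rest hne, pvInfix_append_cons m _ _ c hc, ih]
      simp

theorem pvFind_unique (s m : List Char) (j : Nat) (h1 : m <+: s.drop j)
    (h2 : ∀ i < j, ¬ m <+: s.drop i) : PySem.Chars.find s m = j := by
  have hnn : 0 ≤ PySem.Chars.find s m := by
    rw [PySem.Chars.find_nonneg_iff]
    exact pvDrop_prefix_infix j h1
  obtain ⟨hp, hmin⟩ := PySem.Chars.find_spec hnn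
  have hk : (PySem.Chars.find s m).toNat = j := by
    rcases Nat.lt_trichotomy (PySem.Chars.find s m).toNat j with h | h | h
    · exact absurd hp (h2 _ h)
    · exact h
    · exact absurd h1 (hmin _ h)
  omega

theorem pvFind_nl (u v : List Char) (hu : '\n' ∉ u) :
    PySem.Chars.find (u ++ '\n' :: v) ['\n'] = u.length := by
  apply pvFind_unique
  · rw [List.drop_append_of_le_length (le_refl _)]
    simp
  · intro i hi hpre
    rw [List.drop_append_of_le_length (by omega)] at hpre
    apply hu
    have hne : u.drop i ≠ [] := by
      simp only [ne_eq, List.drop_eq_nil_iff]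
      omega
    have := hpre.getElem (i := 0) (by simp)
    rw [List.getElem_append_left (by simpa [List.length_pos_iff] using hne)] at this
    have h1 : (List.drop i u)[0]'(by simpa [List.length_pos_iff] using hne) = '\n' := by
      simpa using this.symm
    exact List.mem_of_mem_drop (h1 ▸ List.getElem_mem _)

theorem pvFind_nl_none (u : List Char) (hu : '\n' ∉ u) :
    PySem.Chars.find u ['\n'] = -1 := by
  rw [PySem.Chars.find_eq_neg_one_iff]
  intro h
  exact hu (h.subset (by simp))

theorem pvMarker_props : pvMarker ≠ [] ∧ '\n' ∉ pvMarker := by decide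

theorem pvIdx_structure (L : List (List Char)) (rest : List (List Char))
    (hfree : ∀ l ∈ L, '\n' ∉ l) (h : pvSpecRest L = some rest) :
    0 ≤ PySem.Chars.find (PySem.Chars.join ['\n'] L) pvMarker ∧
    ∃ u : List Char, '\n' ∉ u ∧
      (PySem.Chars.join ['\n'] L).drop (PySem.Chars.find (PySem.Chars.join ['\n'] L) pvMarker).toNat =
        u ++ (if rest = [] then [] else '\n' :: PySem.Chars.join ['\n'] rest) := by
  induction L generalizing rest with
  | nil => simp [pvSpecRest] at h
  | cons l tl ih =>
    rw [pvSpecRest] at h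
    by_cases hm : PySem.Chars.isIn pvMarker l
    · rw [if_pos hm] at h
      have hrt : rest = tl := by simpa using h.symm
      subst hrt
      have hinl : pvMarker <:+: l := (PySem.Chars.isIn_iff_infix _ _).mp hm
      rcases eq_or_ne rest [] with rfl | hne
      · rw [PySem.Chars.join_singleton]
        have h0 : 0 ≤ PySem.Chars.find l pvMarker := (PySem.Chars.find_nonneg_iff _ _).mpr hinl
        refine ⟨h0, l.drop (PySem.Chars.find l pvMarker).toNat, ?_, by simp⟩
        exact fun hmem => hfree l (by simp) (List.mem_of_mem_drop hmem)
      · rw [pvJoin_cons _ _ _ hne]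
        have h0l : 0 ≤ PySem.Chars.find l pvMarker := (PySem.Chars.find_nonneg_iff _ _).mpr hinl
        have hkle : (PySem.Chars.find l pvMarker).toNat ≤ l.length := by
          have := PySem.Chars.find_le_length l pvMarker
          omega
        have hocc : pvMarker <+:
            (l ++ '\n' :: PySem.Chars.join ['\n'] rest).drop (PySem.Chars.find l pvMarker).toNat := by
          rw [List.drop_append_of_le_length hkle]
          exact (PySem.Chars.find_spec h0l).1.trans (List.prefix_append _ _)
        have h0 : 0 ≤ PySem.Chars.find (l ++ '\n' :: PySem.Chars.join ['\n'] rest) pvMarker :=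
          (PySem.Chars.find_nonneg_iff _ _).mpr (pvDrop_prefix_infix _ hocc)
        have hidxle : (PySem.Chars.find (l ++ '\n' :: PySem.Chars.join ['\n'] rest) pvMarker).toNat ≤ l.length := by
          by_contra hgt
          exact (PySem.Chars.find_spec h0).2 _ (by omega) hocc
        refine ⟨h0, l.drop (PySem.Chars.find (l ++ '\n' :: PySem.Chars.join ['\n'] rest) pvMarker).toNat,
          fun hmem => hfree l (by simp) (List.mem_of_mem_drop hmem), ?_⟩
        rw [List.drop_append_of_le_length hidxle, if_neg hne]
    · rw [if_neg hm] at h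
      have hne : tl ≠ [] := by rintro rfl; simp [pvSpecRest] at h
      obtain ⟨h0, u, hu, hdrop⟩ := ih rest (fun l hl => hfree l (by simp [hl])) h
      rw [pvJoin_cons _ _ _ hne]
      set w := PySem.Chars.join ['\n'] tl with hw
      set k := (PySem.Chars.find w pvMarker).toNat with hk
      have hfind : PySem.Chars.find (l ++ '\n' :: w) pvMarker = (l.length + 1 + k : Nat) := by
        apply pvFind_unique
        · have : List.drop (l.length + 1 + k) (l ++ '\n' :: w) = List.drop k w := by
            rw [List.drop_append, List.drop_eq_nil_of_le (by omega), List.nil_append,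
              show l.length + 1 + k - l.length = k + 1 by omega, List.drop_succ_cons]
          rw [this]
          exact (PySem.Chars.find_spec h0).1
        · intro i hi hpre
          rcases Nat.lt_or_ge l.length i with hgt | hle
          · rw [List.drop_append, List.drop_eq_nil_of_le (by omega), List.nil_append,
              show i - l.length = i - l.length - 1 + 1 by omega, List.drop_succ_cons] at hpre
            exact (PySem.Chars.find_spec h0).2 _ (by omega) hpre
          · rw [List.drop_append_of_le_length hle] at hpre
            have := pvPrefix_split _ _ _ _ pvMarker_props.2 hpre
            exact hm ((PySem.Chars.isIn_iff_infix _ _).mpr (pvDrop_prefix_infix _ this))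
      refine ⟨by rw [hfind]; positivity, u, hu, ?_⟩
      rw [hfind]
      rw [show ((((l.length + 1 + k : Nat) : Int)).toNat) = l.length + 1 + k by omega]
      rw [List.drop_append, List.drop_eq_nil_of_le (by omega), List.nil_append,
        show l.length + 1 + k - l.length = k + 1 by omega, List.drop_succ_cons]
      exact hdrop

def pvTail (t : List Char) : List Char :=
  if PySem.Chars.find t ['\n'] = -1 then []
  else PySem.Chars.join ['\n']
    ((List.splitOn '\n' (t.drop ((PySem.Chars.find t ['\n']).toNat + 1))).take 5)

theorem pvTail_value (u : List Char) (rest : List (List Char)) (hu : '\n' ∉ u)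
    (hfree : ∀ l ∈ rest, '\n' ∉ l) :
    pvTail (u ++ (if rest = [] then [] else '\n' :: PySem.Chars.join ['\n'] rest)) =
      PySem.Chars.join ['\n'] (rest.take 5) := by
  rcases eq_or_ne rest [] with rfl | hne
  · show pvTail (u ++ []) = _
    rw [List.append_nil, pvTail, if_pos (pvFind_nl_none u hu)]
    simp [PySem.Chars.join_nil]
  · rw [if_neg hne, pvTail, pvFind_nl u _ hu]
    rw [if_neg (by omega)]
    rw [show ((u.length : Int)).toNat = u.length by omega]
    rw [List.drop_append, List.drop_eq_nil_of_le (by omega), List.nil_append,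
      show u.length + 1 - u.length = 0 + 1 by omega, List.drop_succ_cons, List.drop_zero]
    rw [show PySem.Chars.join ['\n'] rest = ['\n'].intercalate rest from rfl]
    rw [List.splitOn_intercalate (ls := rest) '\n' hfree hne]

theorem pvSpecRest_none_iff (L : List (List Char)) :
    pvSpecRest L = none ↔ ∀ l ∈ L, ¬ PySem.Chars.isIn pvMarker l := by
  induction L with
  | nil => simp [pvSpecRest]
  | cons l tl ih =>
    rw [pvSpecRest]
    by_cases hm : PySem.Chars.isIn pvMarker l
    · simp [hm]
    · simp [hm, ih]

theorem pvMain (prompt : String) : demo_llm prompt = demo_llm_alt prompt := by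
  unfold demo_llm demo_llm_alt
  dsimp only
  have hnl : "\n".toList = ['\n'] := rfl
  have hmk : "Relevant context:".toList = pvMarker := rfl
  rw [hnl, hmk]
  set s := prompt.toList with hs
  rw [pvSplitOn_eq]
  set L := List.splitOn '\n' s with hLdef
  have hjoin : PySem.Chars.join ['\n'] L = s := List.intercalate_splitOn s '\n'
  have hfree : ∀ l ∈ L, '\n' ∉ l := pvSplitOn_free '\n' s
  rcases hsp : pvSpecRest L with _ | rest
  · -- not found
    rw [pvFindStartA_none L 0 hsp]
    have hnotin : ¬ pvMarker <:+: s := by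
      rw [← hjoin, pvInfix_join pvMarker '\n' pvMarker_props.2 pvMarker_props.1]
      rintro ⟨l, hl, hinf⟩
      exact ((pvSpecRest_none_iff L).mp hsp l hl) ((PySem.Chars.isIn_iff_infix _ _).mpr hinf)
    rw [if_neg (by simp), if_pos ((PySem.Chars.find_eq_neg_one_iff _ _).mpr hnotin)]
  · -- found
    obtain ⟨j, hstart, hrest⟩ := pvFindStartA_some L rest 0 hsp
    obtain ⟨h0, u, hu, hdrop⟩ := pvIdx_structure L rest hfree hsp
    rw [hjoin] at h0 hdrop
    set idx := PySem.Chars.find s pvMarker with hidx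
    set k := idx.toNat with hk
    have hkval : idx = (k : Int) := by omega
    have hkle : k ≤ s.length := by
      have := PySem.Chars.find_le_length s pvMarker
      omega
    rw [hstart, if_pos (by omega), if_neg (by omega)]
    rw [show (0 : Int) + j + 1 = ((j + 1 : Nat) : Int) by push_cast; ring,
      show ((j + 1 : Nat) : Int) + 5 = ((j + 6 : Nat) : Int) by push_cast; ring,
      PySem.List.slice_natCast, show j + 6 - (j + 1) = 5 by omega, ← hrest]
    rw [hkval, PySem.Chars.findFrom_natCast s ['\n'] k hkle]
    set t := s.drop k with ht
    have hfree' : ∀ l ∈ rest, '\n' ∉ l := fun l hl => hfree l (List.mem_of_mem_drop (hrest ▸ hl))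
    have htail := pvTail_value u rest hu hfree'
    rw [← hdrop] at htail
    rcases eq_or_ne (PySem.Chars.find t ['\n']) (-1) with hft | hft
    · rw [if_pos hft, if_pos rfl]
      rw [pvTail, if_pos hft] at htail
      rw [← htail]
    · have hft0 : 0 ≤ PySem.Chars.find t ['\n'] := by
        have := PySem.Chars.neg_one_le_find t ['\n']
        omega
      rw [if_neg hft, if_neg (by omega : ¬ ((k : Int) + PySem.Chars.find t ['\n'] = -1))]
      rw [PySem.List.slice_from _ (by omega : (0:Int) ≤ (k : Int) + PySem.Chars.find t ['\n'] + 1)]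
      rw [show ((k : Int) + PySem.Chars.find t ['\n'] + 1).toNat
            = k + ((PySem.Chars.find t ['\n']).toNat + 1) by omega]
      rw [← List.drop_drop, ← ht]
      rw [PySem.List.slice_to _ (by omega : (0:Int) ≤ 5), pvSplitOn_eq]
      rw [pvTail, if_neg hft] at htail
      rw [show ((5:Int)).toNat = 5 from rfl, htail]

-- ===== VERDICT (by name: the statement is the Claim_ definition above) =====
theorem demo_llm_spec : Claim_equal_demo_llm := by
  unfold Claim_equal_demo_llm Spec_demo_llm
  exact fun prompt _ => pvMain prompt
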